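-- pv_equiv track=rewrite | github.com/nbaggett/school_projects | python/calcudoku/solverFuncs.py | check_rows_valid
-- ===== SOURCE A (Python) =====
-- def check_rows_valid(puzzle):
--    isFalse = 0
--    for row in puzzle:
--       one = 0
--       two = 0
--       three = 0
--       four = 0
--       five = 0
--       for val in row:
--          if val == 1:
--             one += 1
--          if val == 2:
--             two += 1
--          if val == 3:
--             three += 1
--          if val == 4:
--             four += 1
--          if val == 5:
--             five += 1
--       if (one > 1 or two > 1 or three > 1 or four > 1 or five > 1):
--          isFalse += 1
--          break
--    if isFalse > 0:
--       return False
--    elif isFalse == 0: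
--       return True
-- ===== SOURCE B (Python) =====
-- def check_rows_valid(puzzle):
--     for row in puzzle:
--         seen = set()
--         for val in row:
--             if 1 <= val <= 5:
--                 if val in seen:
--                     return False
--                 seen.add(val)
--     return True
-- ===== Notes on version B (the rewrite author's own statement) =====
-- stated objective: idiomatic
-- what changed: Replaces the five per-value counters and the post-row OR test with a single per-row seen-set that returns False at the first repeated 1-5 value, and drops the isFalse flag/break for a direct early return.
import Mathlib
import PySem

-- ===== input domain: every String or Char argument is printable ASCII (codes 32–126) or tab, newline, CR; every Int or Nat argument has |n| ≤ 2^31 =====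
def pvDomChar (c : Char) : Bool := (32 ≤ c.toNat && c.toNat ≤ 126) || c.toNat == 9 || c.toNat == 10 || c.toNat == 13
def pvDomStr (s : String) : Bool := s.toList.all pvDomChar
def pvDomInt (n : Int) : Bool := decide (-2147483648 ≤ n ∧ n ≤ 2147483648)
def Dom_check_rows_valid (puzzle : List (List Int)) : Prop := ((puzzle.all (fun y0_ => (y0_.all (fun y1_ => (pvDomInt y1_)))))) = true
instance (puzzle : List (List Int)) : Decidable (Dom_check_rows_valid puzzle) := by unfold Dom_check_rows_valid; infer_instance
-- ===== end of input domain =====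

-- B replaces A's five per-value counters and post-row OR test with a per-row seen-set
-- and an early return at the first repeated 1..5 value (idiomatic; same results).

-- ===== PORT A =====
-- per-row inner loop: the five counters, updated exactly as in A
def pvCountersA (row : List Int) : Int × Int × Int × Int × Int :=
  row.foldl (fun (s : Int × Int × Int × Int × Int) (v : Int) =>
    let (one, two, three, four, five) := s
    let one   := if v = 1 then one + 1 else one
    let two   := if v = 2 then two + 1 else two
    let three := if v = 3 then three + 1 else three
    let four  := if v = 4 then four + 1 else four
    let five  := if v = 5 then five + 1 else five
    (one, two, three, four, five)) (((0:Int), (0:Int), (0:Int), (0:Int), (0:Int)))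

-- outer loop with the break: returns the final isFalse
def pvIsFalseA : List (List Int) → Int
  | [] => 0
  | row :: rest =>
    let (one, two, three, four, five) := pvCountersA row
    if one > 1 ∨ two > 1 ∨ three > 1 ∨ four > 1 ∨ five > 1 then 1
    else pvIsFalseA rest

def check_rows_valid (puzzle : List (List Int)) : Bool :=
  let isFalse := pvIsFalseA puzzle
  if isFalse > 0 then false else true

-- ===== PORT B =====
-- per-row scan with the seen-set; true means "duplicate found, return False"
def pvRowDupB (seen : PySem.Set Int) : List Int → Bool
  | [] => false
  | v :: vs =>
    if 1 ≤ v ∧ v ≤ 5 then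
      if PySem.Set.contains seen v then true
      else pvRowDupB (PySem.Set.add seen v) vs
    else pvRowDupB seen vs

def check_rows_valid_alt : List (List Int) → Bool
  | [] => true
  | row :: rest =>
    if pvRowDupB PySem.Set.empty row then false else check_rows_valid_alt rest

-- ===== PRECONDITION & SPEC =====
def Spec_check_rows_valid (puzzle : List (List Int)) (out : Bool) : Prop := out = check_rows_valid_alt puzzle
instance (puzzle : List (List Int)) (out : Bool) : Decidable (Spec_check_rows_valid puzzle out) := by unfold Spec_check_rows_valid; infer_instance

-- ===== CLAIM (what is proved, stated in full; the proofs are below) =====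
def Claim_equal_check_rows_valid : Prop := ∀ (puzzle : List (List Int)), Dom_check_rows_valid puzzle → Spec_check_rows_valid puzzle (check_rows_valid puzzle)

-- ===== LEMMAS AND PROOFS =====

-- A's counters are the occurrence counts of 1..5, shifted by the initial state
theorem pvCountersA_count (row : List Int) :
    pvCountersA row =
      ((row.count 1 : Int), (row.count 2 : Int), (row.count 3 : Int),
       (row.count 4 : Int), (row.count 5 : Int)) := by
  have h : ∀ (l : List Int) (a b c d e : Int),
      l.foldl (fun (s : Int × Int × Int × Int × Int) (v : Int) =>
        let (one, two, three, four, five) := s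
        let one   := if v = 1 then one + 1 else one
        let two   := if v = 2 then two + 1 else two
        let three := if v = 3 then three + 1 else three
        let four  := if v = 4 then four + 1 else four
        let five  := if v = 5 then five + 1 else five
        (one, two, three, four, five)) (a, b, c, d, e) =
      (a + l.count 1, b + l.count 2, c + l.count 3, d + l.count 4, e + l.count 5) := by
    intro l
    induction l with
    | nil => intro a b c d e; simp
    | cons x xs ih =>
      intro a b c d e
      simp only [List.foldl_cons]
      rw [ih]
      simp only [List.count_cons, beq_iff_eq, Prod.mk.injEq]
      refine ⟨?_, ?_, ?_, ?_, ?_⟩ <;> (push_cast; split_ifs <;> omega)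
  unfold pvCountersA
  rw [h]
  simp

-- (x :: xs).count v for v ≠ x
theorem pvCountNe (v x : Int) (xs : List Int) (h : v ≠ x) :
    (x :: xs).count v = xs.count v := by
  rw [List.count_cons]
  simp [h, Ne.symm h]

-- B's inner loop finds a duplicate iff some 1..5 value is in `seen` and the row,
-- or occurs at least twice in the row
theorem pvRowDupB_iff (row : List Int) (seen : List Int) :
    pvRowDupB seen row = true ↔
      ∃ v : Int, 1 ≤ v ∧ v ≤ 5 ∧ ((v ∈ seen ∧ v ∈ row) ∨ 2 ≤ row.count v) := by
  induction row generalizing seen with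
  | nil => simp [pvRowDupB]
  | cons x xs ih =>
    by_cases hr : 1 ≤ x ∧ x ≤ 5
    · by_cases hs : x ∈ seen
      · rw [show pvRowDupB seen (x :: xs) = true from by simp [pvRowDupB, hr, hs]]
        constructor
        · intro _
          exact ⟨x, hr.1, hr.2, Or.inl ⟨hs, List.mem_cons_self⟩⟩
        · intro _; rfl
      · have hadd : PySem.Set.add seen x = seen ++ [x] := PySem.Set.add_of_not_mem hs
        rw [show pvRowDupB seen (x :: xs) = pvRowDupB (seen ++ [x]) xs from by
          simp [pvRowDupB, hr, hs, hadd]]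
        rw [ih]
        constructor
        · rintro ⟨v, h1, h5, hcase⟩
          refine ⟨v, h1, h5, ?_⟩
          rcases hcase with ⟨hmem, hxs⟩ | hcnt
          · rcases List.mem_append.mp hmem with hv | hv
            · exact Or.inl ⟨hv, List.mem_cons_of_mem _ hxs⟩
            · simp only [List.mem_singleton] at hv
              subst hv
              right
              have : 1 ≤ xs.count v := List.count_pos_iff.mpr hxs
              rw [List.count_cons_self]
              omega
          · right
            have : xs.count v ≤ (x :: xs).count v := by
              rw [List.count_cons]; split <;> omega
            omega
        · rintro ⟨v, h1, h5, hcase⟩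
          refine ⟨v, h1, h5, ?_⟩
          by_cases hvx : v = x
          · subst hvx
            rcases hcase with ⟨hmem, _⟩ | hcnt
            · exact absurd hmem hs
            · rw [List.count_cons_self] at hcnt
              have : v ∈ xs := List.count_pos_iff.mp (by omega)
              exact ⟨List.mem_append.mpr (Or.inr (List.mem_singleton.mpr rfl)), this⟩ |> Or.inl
          · rcases hcase with ⟨hmem, hm⟩ | hcnt
            · rcases List.mem_cons.mp hm with h | h
              · exact absurd h hvx
              · exact Or.inl ⟨List.mem_append.mpr (Or.inl hmem), h⟩
            · right
              rw [pvCountNe v x xs hvx] at hcnt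
              exact hcnt
    · rw [show pvRowDupB seen (x :: xs) = pvRowDupB seen xs from by simp [pvRowDupB, hr]]
      rw [ih]
      constructor
      · rintro ⟨v, h1, h5, hcase⟩
        refine ⟨v, h1, h5, ?_⟩
        have hvx : v ≠ x := by rintro rfl; exact hr ⟨h1, h5⟩
        rcases hcase with ⟨hmem, hxs⟩ | hcnt
        · exact Or.inl ⟨hmem, List.mem_cons_of_mem _ hxs⟩
        · right; rw [pvCountNe v x xs hvx]; exact hcnt
      · rintro ⟨v, h1, h5, hcase⟩
        refine ⟨v, h1, h5, ?_⟩
        have hvx : v ≠ x := by rintro rfl; exact hr ⟨h1, h5⟩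
        rcases hcase with ⟨hmem, hm⟩ | hcnt
        · rcases List.mem_cons.mp hm with h | h
          · exact absurd h hvx
          · exact Or.inl ⟨hmem, h⟩
        · right; rw [pvCountNe v x xs hvx] at hcnt; exact hcnt

-- per-row agreement: A's counter test ↔ B's seen-set scan from the empty set
theorem row_agree (row : List Int) :
    ((pvCountersA row).1 > 1 ∨ (pvCountersA row).2.1 > 1 ∨ (pvCountersA row).2.2.1 > 1 ∨
     (pvCountersA row).2.2.2.1 > 1 ∨ (pvCountersA row).2.2.2.2 > 1) ↔
    pvRowDupB PySem.Set.empty row = true := by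
  rw [pvCountersA_count, pvRowDupB_iff]
  simp only [PySem.Set.empty, List.not_mem_nil, false_and, false_or]
  constructor
  · intro h
    rcases h with h | h | h | h | h
    · exact ⟨1, by omega, by omega, by push_cast at h ⊢; omega⟩
    · exact ⟨2, by omega, by omega, by push_cast at h ⊢; omega⟩
    · exact ⟨3, by omega, by omega, by push_cast at h ⊢; omega⟩
    · exact ⟨4, by omega, by omega, by push_cast at h ⊢; omega⟩
    · exact ⟨5, by omega, by omega, by push_cast at h ⊢; omega⟩
  · rintro ⟨v, h1, h5, hcnt⟩
    interval_cases v <;> simp_all <;> push_cast <;> omega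

-- the two ports agree on every input
theorem pvAB (puzzle : List (List Int)) :
    check_rows_valid puzzle = check_rows_valid_alt puzzle := by
  induction puzzle with
  | nil => rfl
  | cons row rest ih =>
    unfold check_rows_valid check_rows_valid_alt pvIsFalseA
    by_cases h : pvRowDupB PySem.Set.empty row = true
    · have hA := (row_agree row).mpr h
      rcases hcs : pvCountersA row with ⟨a, b, c, d, e⟩
      rw [hcs] at hA
      have h' : pvRowDupB [] row = true := h
      simp [hcs, hA, h']
    · have hA : ¬ ((pvCountersA row).1 > 1 ∨ (pvCountersA row).2.1 > 1 ∨
          (pvCountersA row).2.2.1 > 1 ∨ (pvCountersA row).2.2.2.1 > 1 ∨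
          (pvCountersA row).2.2.2.2 > 1) := fun hc => h ((row_agree row).mp hc)
      rcases hcs : pvCountersA row with ⟨a, b, c, d, e⟩
      rw [hcs] at hA
      simp only [Bool.not_eq_true] at h
      have h' : pvRowDupB [] row = false := h
      simp only [hcs, if_neg hA, h, h', Bool.false_eq_true, if_neg (by simp : ¬False)]
      simpa [check_rows_valid] using ih

-- ===== VERDICT (by name: the statement is the Claim_ definition above) =====
theorem check_rows_valid_spec : Claim_equal_check_rows_valid := by
  intro puzzle _
  unfold Spec_check_rows_valid
  exact pvAB puzzle
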